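-- pv_equiv track=rewrite | github.com/rawlink/advent-of-code-2020 | day16/day16.py | part1
-- ===== SOURCE A (Python) =====
-- def passes_rules(rules, value):
--     return any([any(map(lambda range: range[0] <= value <= range[1], ranges)) for ranges in rules.values()])
--
-- def part1(rules, others):
--     total = 0
--     valid = []
--     for values in others:
--         bad = False
--         for value in values:
--             if not passes_rules(rules, value):
--                 total += value
--                 bad = True
--         if not bad:
--             valid.append(values)
--
--     return total, valid
-- ===== SOURCE B (Python) =====
-- def part1(rules, others):
--     # Preprocess: merge all rule ranges into sorted disjoint intervals once,
--     # then test each value by binary search.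
--     ranges = sorted((r for rs in rules.values() for r in rs), key=lambda r: r[0])
--     merged = []
--     if ranges:
--         cur_lo, cur_hi = ranges[0]
--         for lo, hi in ranges[1:]:
--             if lo <= cur_hi:
--                 if hi > cur_hi:
--                     cur_hi = hi
--             else:
--                 merged.append((cur_lo, cur_hi))
--                 cur_lo, cur_hi = lo, hi
--         merged.append((cur_lo, cur_hi))
--
--     def covered(v):
--         lo, hi = 0, len(merged)
--         while lo < hi:
--             mid = (lo + hi) // 2
--             if merged[mid][0] <= v:
--                 lo = mid + 1
--             else:
--                 hi = mid
--         return lo > 0 and v <= merged[lo - 1][1]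
--
--     total = 0
--     valid = []
--     for values in others:
--         bad = [v for v in values if not covered(v)]
--         total += sum(bad)
--         if not bad:
--             valid.append(values)
--     return total, valid
-- ===== Notes on version B (the rewrite author's own statement) =====
-- stated objective: faster
-- what changed: Instead of testing each value against every rule range (nested any over all rules), B merges all rule ranges once into sorted disjoint intervals and decides each value's validity by binary search.
import Mathlib
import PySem

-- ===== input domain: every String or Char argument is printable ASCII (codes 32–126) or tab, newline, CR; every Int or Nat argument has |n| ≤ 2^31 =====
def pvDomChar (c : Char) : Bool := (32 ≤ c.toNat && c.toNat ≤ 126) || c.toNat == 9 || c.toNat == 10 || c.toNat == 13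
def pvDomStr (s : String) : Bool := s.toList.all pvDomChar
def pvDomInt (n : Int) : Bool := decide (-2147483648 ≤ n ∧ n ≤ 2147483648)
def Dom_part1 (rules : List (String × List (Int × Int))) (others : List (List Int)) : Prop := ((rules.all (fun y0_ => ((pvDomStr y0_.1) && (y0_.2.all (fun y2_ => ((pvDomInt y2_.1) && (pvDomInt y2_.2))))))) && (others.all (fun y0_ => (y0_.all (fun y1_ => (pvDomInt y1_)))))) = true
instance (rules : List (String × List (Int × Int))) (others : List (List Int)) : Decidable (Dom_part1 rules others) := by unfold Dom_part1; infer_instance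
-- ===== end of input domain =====

-- B merges all rule ranges once into sorted disjoint intervals and tests each value by binary search (faster preprocessing-based algorithm); A tests every value against every range.


-- ===== PORT A =====
-- any([any(map(lambda range: range[0] <= value <= range[1], ranges)) for ranges in rules.values()])
def passes_rules (rules : List (String × List (Int × Int))) (value : Int) : Bool :=
  ((rules.map (fun kv => kv.2)).map
      (fun ranges => ranges.any (fun r => decide (r.1 ≤ value) && decide (value ≤ r.2)))).any (fun b => b)

def part1 (rules : List (String × List (Int × Int))) (others : List (List Int)) : Int × List (List Int) :=
  others.foldl (fun (acc : Int × List (List Int)) values =>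
    let inner := values.foldl (fun (tb : Int × Bool) value =>
        if !passes_rules rules value then (tb.1 + value, true) else tb) (acc.1, false)
    (inner.1, if !inner.2 then acc.2 ++ [values] else acc.2)) (0, [])

-- ===== PORT B =====
-- the merge loop of Source B: state (cur_lo, cur_hi), remaining sorted ranges
def mergeGo (curLo curHi : Int) : List (Int × Int) → List (Int × Int)
  | [] => [(curLo, curHi)]
  | (lo, hi) :: rest =>
      if lo ≤ curHi then mergeGo curLo (if hi > curHi then hi else curHi) rest
      else (curLo, curHi) :: mergeGo lo hi rest

def mergeRanges : List (Int × Int) → List (Int × Int)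
  | [] => []
  | (lo, hi) :: rest => mergeGo lo hi rest

-- the while-loop of covered(); Python's lo, hi are nonnegative ints, so Nat is exact here;
-- merged[mid] is always in range (0 ≤ lo ≤ mid < hi ≤ len), so getD is exact.
def bsearchGo (merged : List (Int × Int)) (v : Int) (lo hi : Nat) : Nat :=
  if lo < hi then
    let mid := (lo + hi) / 2
    if (merged.getD mid (0, 0)).1 ≤ v then bsearchGo merged v (mid + 1) hi
    else bsearchGo merged v lo mid
  else lo
termination_by hi - lo
decreasing_by all_goals omega

def coveredB (merged : List (Int × Int)) (v : Int) : Bool :=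
  let k := bsearchGo merged v 0 merged.length
  decide (0 < k) && decide (v ≤ (merged.getD (k - 1) (0, 0)).2)

def part1_alt (rules : List (String × List (Int × Int))) (others : List (List Int)) : Int × List (List Int) :=
  let merged := mergeRanges (PySem.List.sorted (rules.flatMap (fun kv => kv.2)) (fun r => r.1) false)
  others.foldl (fun (acc : Int × List (List Int)) values =>
    let bad := values.filter (fun v => !coveredB merged v)
    (acc.1 + bad.foldl (· + ·) 0, if bad.isEmpty then acc.2 ++ [values] else acc.2)) (0, [])

-- ===== PRECONDITION & SPEC =====
def Spec_part1 (rules : List (String × List (Int × Int))) (others : List (List Int)) (out : Int × List (List Int)) : Prop := out = part1_alt rules others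
instance (rules : List (String × List (Int × Int))) (others : List (List Int)) (out : Int × List (List Int)) : Decidable (Spec_part1 rules others out) := by unfold Spec_part1; infer_instance

-- ===== CLAIM (what is proved, stated in full; the proofs are below) =====
def Claim_equal_part1 : Prop := ∀ (rules : List (String × List (Int × Int))) (others : List (List Int)), Dom_part1 rules others → Spec_part1 rules others (part1 rules others)

-- ===== LEMMAS AND PROOFS =====

-- a value is covered by some interval of the list
def anyCov (l : List (Int × Int)) (v : Int) : Bool :=
  l.any (fun r => decide (r.1 ≤ v) && decide (v ≤ r.2))

lemma passes_eq_anyCov (rules : List (String × List (Int × Int))) (v : Int) :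
    passes_rules rules v = anyCov (rules.flatMap (fun kv => kv.2)) v := by
  induction rules with
  | nil => rfl
  | cons kv rest ih =>
      simp [passes_rules, anyCov, List.flatMap_cons, List.any_append] at *
      rw [← ih]

lemma mergeGo_any (v : Int) (l : List (Int × Int)) :
    ∀ curLo curHi, l.Pairwise (fun a b => a.1 ≤ b.1) → (∀ p ∈ l, curLo ≤ p.1) →
    anyCov (mergeGo curLo curHi l) v
      = ((decide (curLo ≤ v) && decide (v ≤ curHi)) || anyCov l v) := by
  induction l with
  | nil => intro curLo curHi _ _; simp [mergeGo, anyCov]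
  | cons p rest ih =>
      intro curLo curHi hsort hlo
      obtain ⟨lo, hi⟩ := p
      have hsr : rest.Pairwise (fun a b => a.1 ≤ b.1) := hsort.tail
      have hlohd : curLo ≤ lo := hlo (lo, hi) (by simp)
      have hlor : ∀ q ∈ rest, lo ≤ q.1 := by
        intro q hq; exact (List.pairwise_cons.mp hsort).1 q hq
      simp only [mergeGo]
      by_cases hcase : lo ≤ curHi
      · rw [if_pos hcase, ih curLo _ hsr (fun q hq => le_trans hlohd (hlor q hq))]
        have hcons : anyCov ((lo, hi) :: rest) v
            = ((decide (lo ≤ v) && decide (v ≤ hi)) || anyCov rest v) := by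
          simp [anyCov]
        rw [hcons]
        cases hrest : anyCov rest v
        · simp only [Bool.or_false]
          apply Bool.eq_iff_iff.mpr
          by_cases hmax : hi > curHi
          · rw [if_pos hmax]; simp; omega
          · rw [if_neg hmax]; simp; omega
        · simp
      · rw [if_neg hcase]
        have hcons : anyCov ((curLo, curHi) :: mergeGo lo hi rest) v
            = ((decide (curLo ≤ v) && decide (v ≤ curHi)) || anyCov (mergeGo lo hi rest) v) := by
          simp [anyCov]
        rw [hcons, ih lo hi hsr hlor]
        have hcons2 : anyCov ((lo, hi) :: rest) v
            = ((decide (lo ≤ v) && decide (v ≤ hi)) || anyCov rest v) := by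
          simp [anyCov]
        rw [hcons2]

-- the separation relation between merged intervals
def sepR (a b : Int × Int) : Prop := a.1 ≤ b.1 ∧ a.2 < b.1

lemma mergeGo_pairwise (l : List (Int × Int)) :
    ∀ curLo curHi, l.Pairwise (fun a b => a.1 ≤ b.1) → (∀ p ∈ l, curLo ≤ p.1) →
    (mergeGo curLo curHi l).Pairwise sepR ∧ (∀ q ∈ mergeGo curLo curHi l, curLo ≤ q.1) := by
  induction l with
  | nil =>
      intro curLo curHi _ _
      exact ⟨by simp [mergeGo], by simp [mergeGo]⟩
  | cons p rest ih =>
      intro curLo curHi hsort hlo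
      obtain ⟨lo, hi⟩ := p
      have hsr : rest.Pairwise (fun a b => a.1 ≤ b.1) := hsort.tail
      have hlohd : curLo ≤ lo := hlo (lo, hi) (by simp)
      have hlor : ∀ q ∈ rest, lo ≤ q.1 := by
        intro q hq; exact (List.pairwise_cons.mp hsort).1 q hq
      simp only [mergeGo]
      by_cases hcase : lo ≤ curHi
      · rw [if_pos hcase]
        exact ih curLo _ hsr (fun q hq => le_trans hlohd (hlor q hq))
      · rw [if_neg hcase]
        obtain ⟨hpw, hge⟩ := ih lo hi hsr hlor
        refine ⟨List.pairwise_cons.mpr ⟨?_, hpw⟩, ?_⟩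
        · intro q hq
          exact ⟨le_trans hlohd (hge q hq), by have := hge q hq; omega⟩
        · intro q hq
          rcases List.mem_cons.mp hq with h | h
          · simp [h]
          · exact le_trans hlohd (hge q h)

lemma bsearchGo_spec (m : List (Int × Int)) (v : Int)
    (hmono : ∀ i j (_ : i < m.length) (_ : j < m.length), i ≤ j → (m.getD i (0,0)).1 ≤ (m.getD j (0,0)).1) :
    ∀ n lo hi, hi - lo ≤ n → lo ≤ hi → hi ≤ m.length →
    (∀ i, i < lo → (m.getD i (0,0)).1 ≤ v) →
    (∀ i, hi ≤ i → i < m.length → v < (m.getD i (0,0)).1) →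
    lo ≤ bsearchGo m v lo hi ∧ bsearchGo m v lo hi ≤ hi ∧
    (∀ i, i < bsearchGo m v lo hi → (m.getD i (0,0)).1 ≤ v) ∧
    (∀ i, bsearchGo m v lo hi ≤ i → i < m.length → v < (m.getD i (0,0)).1) := by
  intro n
  induction n with
  | zero =>
      intro lo hi hfuel hle hlen hbelow habove
      have : lo = hi := by omega
      subst this
      rw [bsearchGo]; simp
      exact ⟨hbelow, habove⟩
  | succ n ih =>
      intro lo hi hfuel hle hlen hbelow habove
      rw [bsearchGo]
      by_cases hlt : lo < hi
      · rw [if_pos hlt]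
        simp only
        set mid := (lo + hi) / 2 with hmid
        have hmlo : lo ≤ mid := by omega
        have hmhi : mid < hi := by omega
        by_cases hc : (m.getD mid (0,0)).1 ≤ v
        · rw [if_pos hc]
          refine (ih (mid+1) hi (by omega) (by omega) hlen ?_ habove).imp (by omega) id
          intro i hi'
          exact le_trans (hmono i mid (by omega) (by omega) (by omega)) hc
        · rw [if_neg hc]
          refine (ih lo mid (by omega) (by omega) (by omega) hbelow ?_).imp id (fun h => ⟨by omega, h.2⟩)
          intro i hmi hil
          exact lt_of_lt_of_le (by omega : v < (m.getD mid (0,0)).1) (hmono mid i (by omega) hil hmi)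
      · rw [if_neg hlt]
        have : lo = hi := by omega
        subst this
        simp
        exact ⟨hbelow, habove⟩

lemma coveredB_eq_anyCov (m : List (Int × Int)) (v : Int)
    (hpw : m.Pairwise sepR) :
    coveredB m v = anyCov m v := by
  have hpwE : ∀ i j (hi : i < m.length) (hj : j < m.length), i < j → sepR m[i] m[j] :=
    List.pairwise_iff_getElem.mp hpw
  have hmono : ∀ i j (_ : i < m.length) (_ : j < m.length), i ≤ j →
      (m.getD i (0,0)).1 ≤ (m.getD j (0,0)).1 := by
    intro i j hi hj hij
    rw [List.getD_eq_getElem _ _ hi, List.getD_eq_getElem _ _ hj]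
    rcases eq_or_lt_of_le hij with h | h
    · subst h; exact le_refl _
    · exact (hpwE i j hi hj h).1
  obtain ⟨hk0, hkn, hlt, hge⟩ := bsearchGo_spec m v hmono m.length 0 m.length
    (by omega) (by omega) (le_refl _) (by omega) (by omega)
  set k := bsearchGo m v 0 m.length with hkdef
  apply Bool.eq_iff_iff.mpr
  simp only [coveredB, ← hkdef, anyCov, List.any_eq_true, Bool.and_eq_true, decide_eq_true_eq]
  constructor
  · rintro ⟨hk, hle⟩
    have hkm : k - 1 < m.length := by omega
    refine ⟨m[k-1], List.getElem_mem hkm, ?_, ?_⟩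
    · have := hlt (k-1) (by omega)
      rwa [List.getD_eq_getElem _ _ hkm] at this
    · rwa [List.getD_eq_getElem _ _ hkm] at hle
  · rintro ⟨r, hr, hr1, hr2⟩
    obtain ⟨j, hj, hjr⟩ := List.mem_iff_getElem.mp hr
    subst hjr
    have hjk : j < k := by
      by_contra h
      have := hge j (by omega) hj
      rw [List.getD_eq_getElem _ _ hj] at this
      omega
    have hjeq : j = k - 1 := by
      by_contra h
      have hj2 : j < k - 1 := by omega
      have := hpwE j (k-1) hj (by omega) hj2
      have hfst := hlt (k-1) (by omega)
      rw [List.getD_eq_getElem _ _ (by omega : k - 1 < m.length)] at hfst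
      have := this.2
      omega
    subst hjeq
    refine ⟨by omega, ?_⟩
    rwa [List.getD_eq_getElem _ _ (by omega : k - 1 < m.length)]

lemma anyCov_perm {l₁ l₂ : List (Int × Int)} (h : l₁.Perm l₂) (v : Int) :
    anyCov l₁ v = anyCov l₂ v := by
  simp only [anyCov]
  induction h with
  | nil => rfl
  | cons x _ ih => simp [ih]
  | swap x y l => simp [Bool.or_left_comm]
  | trans _ _ ih₁ ih₂ => rw [ih₁, ih₂]

lemma covered_eq_passes (rules : List (String × List (Int × Int))) (v : Int) :
    coveredB (mergeRanges (PySem.List.sorted (rules.flatMap (fun kv => kv.2)) (fun r => r.1) false)) v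
      = passes_rules rules v := by
  rw [passes_eq_anyCov]
  set ranges := rules.flatMap (fun kv => kv.2) with hrdef
  have hperm : (PySem.List.sorted ranges (fun r => r.1) false).Perm ranges :=
    PySem.List.sorted_perm ranges _ _
  have hpw : (PySem.List.sorted ranges (fun r => r.1) false).Pairwise (fun a b => a.1 ≤ b.1) :=
    PySem.List.sorted_pairwise ranges _
  rw [← anyCov_perm hperm]
  cases hs : PySem.List.sorted ranges (fun r => r.1) false with
  | nil => simp [mergeRanges, coveredB, bsearchGo, anyCov]
  | cons p rest =>
      obtain ⟨lo, hi⟩ := p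
      rw [hs] at hpw
      have hsr : rest.Pairwise (fun a b => a.1 ≤ b.1) := hpw.tail
      have hlor : ∀ q ∈ rest, lo ≤ q.1 := fun q hq => (List.pairwise_cons.mp hpw).1 q hq
      have hmpw : (mergeGo lo hi rest).Pairwise sepR :=
        (mergeGo_pairwise rest lo hi hsr hlor).1
      rw [show mergeRanges ((lo, hi) :: rest) = mergeGo lo hi rest from rfl]
      rw [coveredB_eq_anyCov _ _ hmpw, mergeGo_any v rest lo hi hsr hlor]
      simp [anyCov]

lemma inner_fold_eq (rules : List (String × List (Int × Int))) (m : List (Int × Int))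
    (hcov : ∀ v : Int, coveredB m v = passes_rules rules v) (values : List Int) :
    ∀ (t : Int) (b : Bool),
    values.foldl (fun (tb : Int × Bool) value =>
        if !passes_rules rules value then (tb.1 + value, true) else tb) (t, b)
      = (t + (values.filter (fun v => !coveredB m v)).foldl (· + ·) 0,
         b || !(values.filter (fun v => !coveredB m v)).isEmpty) := by
  induction values with
  | nil => intro t b; simp
  | cons v vs ih =>
      intro t b
      have hcv : (!coveredB m v) = !passes_rules rules v := by rw [hcov]
      rw [List.foldl_cons, List.filter_cons, hcv]
      have hshift : ∀ (l : List Int) (a : Int), l.foldl (· + ·) a = a + l.foldl (· + ·) 0 := by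
        intro l
        induction l with
        | nil => simp
        | cons x xs ihx => intro a; simp only [List.foldl_cons]; rw [ihx, ihx (0 + x)]; ring
      cases hp : passes_rules rules v
      · simp only [Bool.not_false, if_true]
        rw [ih (t + v) true]
        refine Prod.ext ?_ (by simp)
        simp only [List.foldl_cons]
        rw [hshift (List.filter (fun v => !coveredB m v) vs) (0 + v)]
        ring
      · simp only [Bool.not_true, Bool.false_eq_true, if_false]
        exact ih t b

lemma outer_fold_eq (rules : List (String × List (Int × Int))) (m : List (Int × Int))
    (hcov : ∀ v : Int, coveredB m v = passes_rules rules v) (others : List (List Int)) :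
    ∀ acc : Int × List (List Int),
    others.foldl (fun (acc : Int × List (List Int)) values =>
        let inner := values.foldl (fun (tb : Int × Bool) value =>
            if !passes_rules rules value then (tb.1 + value, true) else tb) (acc.1, false)
        (inner.1, if !inner.2 then acc.2 ++ [values] else acc.2)) acc
      = others.foldl (fun (acc : Int × List (List Int)) values =>
        let bad := values.filter (fun v => !coveredB m v)
        (acc.1 + bad.foldl (· + ·) 0, if bad.isEmpty then acc.2 ++ [values] else acc.2)) acc := by
  induction others with
  | nil => intro acc; rfl
  | cons values rest ih =>
      intro acc
      simp only [List.foldl_cons]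
      rw [inner_fold_eq rules m hcov values acc.1 false]
      simp only [Bool.false_or, Bool.not_not]
      rw [ih]

-- ===== VERDICT (by name: the statement is the Claim_ definition above) =====
theorem part1_spec : Claim_equal_part1 := by
  intro rules others _
  unfold Spec_part1 part1 part1_alt
  exact outer_fold_eq rules _ (fun v => covered_eq_passes rules v) others (0, [])
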